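-- pv_equiv track=rewrite | github.com/Hurrrrrr/fcc_arranger | arranger.py | find_problems_lengths
-- ===== SOURCE A (Python) =====
-- MAX_LENGTH = 4
--
-- def find_problems_lengths(problems):
--
--     max_lengths = []
--     min_lengths = []
--     differential_lengths = []
--
--     for problem in problems:
--         items = problem.split()
--         max_problem_length = max(len(item) for item in items)
--         max_lengths.append(max_problem_length)
--
--     # more complicated than finding max length because we have to ignore operands
--     for problem in problems:
--
--         items = problem.split()
--         min_problem_length = MAX_LENGTH
--
--         for i in range(len(items)):
--             if items[i].isdigit():
--                 if len(items[i]) < min_problem_length: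
--                     min_problem_length = len(items[i])
--
--         min_lengths.append(min_problem_length)
--
--     for i in range(len(max_lengths)):
--         differential_lengths.append(max_lengths[i] - min_lengths[i])
--
--     return differential_lengths
-- ===== SOURCE B (Python) =====
-- MAX_LENGTH = 4
--
-- def find_problems_lengths(problems):
--     # single pass: per problem compute max token length and min digit-token
--     # length (floored at MAX_LENGTH) together, append the difference directly
--     differential_lengths = []
--     for problem in problems:
--         items = problem.split()
--         max_len = max(len(item) for item in items)
--         min_len = MAX_LENGTH
--         for item in items:
--             if item.isdigit() and len(item) < min_len:
--                 min_len = len(item)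
--         differential_lengths.append(max_len - min_len)
--     return differential_lengths
-- ===== Notes on version B (the rewrite author's own statement) =====
-- stated objective: simpler
-- what changed: Replaces A's three separate passes (parallel max_lengths/min_lengths arrays plus an index loop subtracting them) by one loop over the problems that computes each difference directly, with the inner minimum scan iterating over the tokens instead of range(len(items)).
import Mathlib
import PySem

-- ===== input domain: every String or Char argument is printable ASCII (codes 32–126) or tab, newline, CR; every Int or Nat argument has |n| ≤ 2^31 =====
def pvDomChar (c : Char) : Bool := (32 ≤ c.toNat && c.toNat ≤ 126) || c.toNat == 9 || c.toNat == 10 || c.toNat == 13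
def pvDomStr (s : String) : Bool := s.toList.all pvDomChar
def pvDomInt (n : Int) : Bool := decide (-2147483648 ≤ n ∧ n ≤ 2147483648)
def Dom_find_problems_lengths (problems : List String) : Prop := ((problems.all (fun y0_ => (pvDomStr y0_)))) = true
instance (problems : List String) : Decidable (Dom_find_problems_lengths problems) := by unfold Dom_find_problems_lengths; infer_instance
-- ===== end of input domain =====

-- B fuses A's three passes (parallel arrays + index subtraction loop) into one loop per problem: simpler, same cost.
-- ===== PORT A =====
-- MAX_LENGTH = 4 is inlined as the literal 4, as in the source's module constant.
def find_problems_lengths (problems : List String) : List Int :=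
  let max_lengths : List Int := problems.foldl (fun acc problem =>
    let items := PySem.Str.split₀ problem
    -- max(len(item) for item in items): raises ValueError on empty items; excluded by Pre_
    acc ++ [(PySem.List.max? (items.map PySem.Str.len) (fun y => y)).getD 0]) []
  let min_lengths : List Int := problems.foldl (fun acc problem =>
    let items := PySem.Str.split₀ problem
    let min_problem_length := (PySem.List.pyRange 0 (PySem.List.len items) 1).foldl
      (fun m i =>
        let it := PySem.List.pyGetD items i ""
        if PySem.Str.strIsdigit it then
          (if PySem.Str.len it < m then PySem.Str.len it else m)
        else m) 4
    acc ++ [min_problem_length]) []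
  (PySem.List.pyRange 0 (PySem.List.len max_lengths) 1).foldl
    (fun acc i => acc ++ [PySem.List.pyGetD max_lengths i 0 - PySem.List.pyGetD min_lengths i 0]) []

-- ===== PORT B =====
def find_problems_lengths_alt (problems : List String) : List Int :=
  problems.foldl (fun acc problem =>
    let items := PySem.Str.split₀ problem
    let max_len := (PySem.List.max? (items.map PySem.Str.len) (fun y => y)).getD 0
    let min_len := items.foldl
      (fun m item =>
        if PySem.Str.strIsdigit item && decide (PySem.Str.len item < m) then PySem.Str.len item
        else m) 4
    acc ++ [max_len - min_len]) []

-- ===== PRECONDITION & SPEC =====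
-- Pre_ excludes inputs containing a whitespace-only (or empty) problem string: there A's
-- max() is applied to an empty sequence and raises ValueError (B raises identically).
def Pre_find_problems_lengths (problems : List String) : Prop :=
  ∀ p ∈ problems, PySem.Str.split₀ p ≠ []
instance (problems : List String) : Decidable (Pre_find_problems_lengths problems) := by unfold Pre_find_problems_lengths; infer_instance
def pvWitness_find_problems_lengths : List String := ["12 + 345", "1 - 2"]
def Spec_find_problems_lengths (problems : List String) (out : List Int) : Prop := out = find_problems_lengths_alt problems
instance (problems : List String) (out : List Int) : Decidable (Spec_find_problems_lengths problems out) := by unfold Spec_find_problems_lengths; infer_instance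

-- ===== CLAIM (what is proved, stated in full; the proofs are below) =====
def Claim_equal_find_problems_lengths : Prop := ∀ (problems : List String), Dom_find_problems_lengths problems → Pre_find_problems_lengths problems → Spec_find_problems_lengths problems (find_problems_lengths problems)

-- ===== LEMMAS AND PROOFS =====

-- A's indexed inner minimum loop equals B's fused fold over the tokens
theorem pvMin_eq (p : String) :
    (PySem.List.pyRange 0 (PySem.List.len (PySem.Str.split₀ p))).foldl
      (fun m i =>
        if PySem.Str.strIsdigit (PySem.List.pyGetD (PySem.Str.split₀ p) i "") then
          (if PySem.Str.len (PySem.List.pyGetD (PySem.Str.split₀ p) i "") < m then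
            PySem.Str.len (PySem.List.pyGetD (PySem.Str.split₀ p) i "")
          else m)
        else m) 4
    = (PySem.Str.split₀ p).foldl
      (fun m item =>
        if PySem.Str.strIsdigit item && decide (PySem.Str.len item < m) then PySem.Str.len item
        else m) 4 := by
  have h := PySem.List.foldl_pyRange_pyGetD (PySem.Str.split₀ p) ""
      (fun m item =>
        if PySem.Str.strIsdigit item then
          (if PySem.Str.len item < m then PySem.Str.len item else m)
        else m) 4 (a := 0) (by norm_num)
  simp only [Int.toNat_zero, List.drop_zero] at h
  rw [h]
  congr 1
  funext m item
  simp only [Bool.and_eq_true, decide_eq_true_eq]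
  split_ifs <;> first | rfl | omega | tauto

-- A's third pass, indexing two parallel map-lists, equals the fused map
theorem pvThird (f g : String → Int) (ps : List String) :
    (PySem.List.pyRange 0 (PySem.List.len (ps.map f))).map
      (fun i => PySem.List.pyGetD (ps.map f) i 0 - PySem.List.pyGetD (ps.map g) i 0)
    = ps.map (fun p => f p - g p) := by
  simp only [PySem.List.len_eq, List.length_map]
  rw [PySem.List.pyRange_zero_natCast, List.map_map]
  apply List.ext_getElem
  · simp
  · intro i h1 h2
    simp only [List.getElem_map, List.getElem_range, Function.comp]
    simp only [List.length_map, List.length_range] at h1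
    rw [PySem.List.pyGetD_natCast, PySem.List.pyGetD_natCast]
    rw [List.getD_eq_getElem _ _ (by simpa using h1), List.getD_eq_getElem _ _ (by simpa using h1)]
    simp

-- ===== VERDICT (by name: the statement is the Claim_ definition above) =====
theorem find_problems_lengths_spec : Claim_equal_find_problems_lengths := by
  intro problems _ _
  show find_problems_lengths problems = find_problems_lengths_alt problems
  unfold find_problems_lengths find_problems_lengths_alt
  simp only [PySem.List.foldl_append_singleton_eq_map, List.nil_append]
  rw [pvThird]
  refine List.map_congr_left ?_
  intro p _
  rw [pvMin_eq p]
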